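-- pv_equiv track=rewrite | github.com/MrBrantCode/unitest_baseline | mut_generate/mist_train_taco/taco_19079/solution.py | find_kth_missing_element
-- ===== SOURCE A (Python) =====
-- def find_kth_missing_element(a: list, b: list, k: int) -> int:
--     # Convert list b to a set for O(1) average time complexity lookups
--     b_set = set(b)
--
--     # Counter for the missing elements
--     missing_count = 0
--
--     # Iterate through the increasing sequence a
--     for num in a:
--         if num not in b_set:
--             missing_count += 1
--             if missing_count == k:
--                 return num
--
--     # If we exhaust the list and don't find the k-th missing element, return -1
--     return -1
-- ===== SOURCE B (Python) =====
-- def find_kth_missing_element(a: list, b: list, k: int) -> int: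
--     # Different mechanism: sorted array + hand-rolled binary search instead of a
--     # hash set, and a countdown on k instead of a running missing-counter.
--     sb = sorted(b)
--     if k >= 1:
--         for x in a:
--             lo, hi = 0, len(sb)
--             while lo < hi:
--                 mid = (lo + hi) // 2
--                 if sb[mid] < x:
--                     lo = mid + 1
--                 else:
--                     hi = mid
--             if not (lo < len(sb) and sb[lo] == x):
--                 k -= 1
--                 if k == 0:
--                     return x
--     return -1
-- ===== Notes on version B (the rewrite author's own statement) =====
-- stated objective: alternative
-- what changed: Membership in b is decided by binary search over a sorted copy of b instead of a hash set, and the k-th survivor is found by counting k down to zero instead of counting missing elements up to k.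
import Mathlib
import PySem

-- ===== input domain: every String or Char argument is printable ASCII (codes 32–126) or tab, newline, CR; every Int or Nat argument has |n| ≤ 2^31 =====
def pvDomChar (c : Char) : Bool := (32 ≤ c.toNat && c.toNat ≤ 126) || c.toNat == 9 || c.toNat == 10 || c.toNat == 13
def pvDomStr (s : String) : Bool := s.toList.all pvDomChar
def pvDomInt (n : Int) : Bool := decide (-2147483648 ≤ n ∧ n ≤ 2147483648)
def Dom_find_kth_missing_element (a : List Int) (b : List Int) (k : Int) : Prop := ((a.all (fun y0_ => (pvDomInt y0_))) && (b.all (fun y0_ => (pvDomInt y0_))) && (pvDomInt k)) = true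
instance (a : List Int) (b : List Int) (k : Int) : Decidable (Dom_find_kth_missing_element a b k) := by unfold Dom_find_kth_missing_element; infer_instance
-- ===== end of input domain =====

-- B replaces A's hash-set lookup with binary search over a sorted copy of b and
-- A's upward missing-counter with a countdown on k (objective: alternative).

-- ===== PORT A =====
-- A's for-loop with the running missing_count, returning early when it hits k.
def find_kth_loopA (xs : List Int) (bset : PySem.Set Int) (k : Int) (missing_count : Int) : Int :=
  match xs with
  | [] => -1
  | num :: rest =>
      if !(decide (num ∈ bset)) then
        if missing_count + 1 == k then num
        else find_kth_loopA rest bset k (missing_count + 1)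
      else find_kth_loopA rest bset k missing_count

def find_kth_missing_element (a : List Int) (b : List Int) (k : Int) : Int :=
  find_kth_loopA a (PySem.Set.ofList b) k 0

-- ===== PORT B =====
-- Source B's inner `while lo < hi` binary-search loop, step for step (mid inlined).
def pvBsLo (sb : List Int) (x : Int) (lo hi : Nat) : Nat :=
  if _h : lo < hi then
    if sb.getD ((lo + hi) / 2) 0 < x then pvBsLo sb x ((lo + hi) / 2 + 1) hi
    else pvBsLo sb x lo ((lo + hi) / 2)
  else lo
termination_by hi - lo
decreasing_by all_goals omega

-- `lo < len(sb) and sb[lo] == x` after the search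
def pvPresent (sb : List Int) (x : Int) : Bool :=
  decide (pvBsLo sb x 0 sb.length < sb.length) && (sb.getD (pvBsLo sb x 0 sb.length) 0 == x)

-- Source B's for-loop: decrement k, return x when it reaches 0.
def find_kth_loopB (sb : List Int) (xs : List Int) (k : Int) : Int :=
  match xs with
  | [] => -1
  | x :: rest =>
      if pvPresent sb x then find_kth_loopB sb rest k
      else if k - 1 == 0 then x
      else find_kth_loopB sb rest (k - 1)

def find_kth_missing_element_alt (a : List Int) (b : List Int) (k : Int) : Int :=
  let sb := PySem.List.sorted b (fun x => x) false
  if 1 ≤ k then find_kth_loopB sb a k else -1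

-- ===== PRECONDITION & SPEC =====
def Spec_find_kth_missing_element (a : List Int) (b : List Int) (k : Int) (out : Int) : Prop := out = find_kth_missing_element_alt a b k
instance (a : List Int) (b : List Int) (k : Int) (out : Int) : Decidable (Spec_find_kth_missing_element a b k out) := by unfold Spec_find_kth_missing_element; infer_instance

-- ===== CLAIM (what is proved, stated in full; the proofs are below) =====
def Claim_equal_find_kth_missing_element : Prop := ∀ (a : List Int) (b : List Int) (k : Int), Dom_find_kth_missing_element a b k → Spec_find_kth_missing_element a b k (find_kth_missing_element a b k)

-- ===== LEMMAS AND PROOFS =====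

-- monotonicity of the sorted list, in getD form
theorem pv_sorted_getD_mono (b : List Int) (p q : Nat) (hpq : p ≤ q)
    (hq : q < (PySem.List.sorted b (fun x => x) false).length) :
    (PySem.List.sorted b (fun x => x) false).getD p 0 ≤ (PySem.List.sorted b (fun x => x) false).getD q 0 := by
  have hp : p < (PySem.List.sorted b (fun x => x) false).length := lt_of_le_of_lt hpq hq
  rw [List.getD_eq_getElem _ _ hp, List.getD_eq_getElem _ _ hq]
  exact PySem.List.sorted_id_getElem_mono (xs := b) hpq hq

-- binary-search invariant: the final lo separates elements < x from elements ≥ x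
theorem pvBsLo_spec (sb : List Int) (x : Int)
    (hmono : ∀ p q, p ≤ q → q < sb.length → sb.getD p 0 ≤ sb.getD q 0) :
    ∀ fuel lo hi, hi - lo ≤ fuel → lo ≤ hi → hi ≤ sb.length →
    (∀ i, i < lo → sb.getD i 0 < x) →
    (∀ i, hi ≤ i → i < sb.length → x ≤ sb.getD i 0) →
    (∀ i, i < pvBsLo sb x lo hi → sb.getD i 0 < x) ∧
    (∀ i, pvBsLo sb x lo hi ≤ i → i < sb.length → x ≤ sb.getD i 0) ∧
    pvBsLo sb x lo hi ≤ sb.length := by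
  intro fuel
  induction fuel with
  | zero =>
      intro lo hi hf hlh hhl hlo hhi
      have h : ¬ lo < hi := by omega
      rw [pvBsLo, dif_neg h]
      exact ⟨hlo, fun i h1 h2 => hhi i (by omega) h2, by omega⟩
  | succ n ih =>
      intro lo hi hf hlh hhl hlo hhi
      by_cases h : lo < hi
      · rw [pvBsLo, dif_pos h]
        by_cases hc : sb.getD ((lo + hi) / 2) 0 < x
        · rw [if_pos hc]
          apply ih ((lo + hi) / 2 + 1) hi (by omega) (by omega) hhl
          · intro i hi2
            rcases Nat.lt_or_ge i ((lo + hi) / 2 + 1) with _ | _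
            · exact lt_of_le_of_lt (hmono i ((lo + hi) / 2) (by omega) (by omega)) hc
            · omega
          · exact hhi
        · rw [if_neg hc]
          apply ih lo ((lo + hi) / 2) (by omega) (by omega) (by omega) hlo
          intro i h1 h2
          exact le_trans (not_lt.mp hc) (hmono ((lo + hi) / 2) i h1 h2)
      · rw [pvBsLo, dif_neg h]
        exact ⟨hlo, fun i h1 h2 => hhi i (by omega) h2, by omega⟩

-- pvPresent on the sorted copy of b decides membership in b
theorem pvPresent_iff (b : List Int) (x : Int) :
    pvPresent (PySem.List.sorted b (fun x => x) false) x = decide (x ∈ b) := by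
  have hmono := pv_sorted_getD_mono b
  obtain ⟨hlt, hge, hle⟩ :=
    pvBsLo_spec (PySem.List.sorted b (fun x => x) false) x hmono
      (PySem.List.sorted b (fun x => x) false).length 0 (PySem.List.sorted b (fun x => x) false).length
      (by omega) (by omega) (le_refl _) (by intro i h; omega) (by intro i h1 h2; omega)
  unfold pvPresent
  by_cases hm : x ∈ b
  · have hmem : x ∈ PySem.List.sorted b (fun x => x) false := by
      rw [PySem.List.mem_sorted]; exact hm
    obtain ⟨j, hj, hjx⟩ := List.mem_iff_getElem.mp hmem
    have hjd : (PySem.List.sorted b (fun x => x) false).getD j 0 = x := by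
      rw [List.getD_eq_getElem _ _ hj]; exact hjx
    have hjr : pvBsLo (PySem.List.sorted b (fun x => x) false) x 0 (PySem.List.sorted b (fun x => x) false).length ≤ j := by
      by_contra hjr
      have := hlt j (by omega)
      omega
    have hrlen : pvBsLo (PySem.List.sorted b (fun x => x) false) x 0 (PySem.List.sorted b (fun x => x) false).length < (PySem.List.sorted b (fun x => x) false).length := by omega
    have h1 : x ≤ (PySem.List.sorted b (fun x => x) false).getD (pvBsLo (PySem.List.sorted b (fun x => x) false) x 0 (PySem.List.sorted b (fun x => x) false).length) 0 := hge _ (le_refl _) hrlen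
    have h2 := hmono _ j hjr hj
    have heq : (PySem.List.sorted b (fun x => x) false).getD (pvBsLo (PySem.List.sorted b (fun x => x) false) x 0 (PySem.List.sorted b (fun x => x) false).length) 0 = x := by omega
    simp only [hm, decide_true]
    rw [Bool.and_eq_true, decide_eq_true_iff, beq_iff_eq]
    exact ⟨hrlen, heq⟩
  · simp only [hm, decide_false]
    by_cases hrlen : pvBsLo (PySem.List.sorted b (fun x => x) false) x 0 (PySem.List.sorted b (fun x => x) false).length < (PySem.List.sorted b (fun x => x) false).length
    · have hne : (PySem.List.sorted b (fun x => x) false).getD (pvBsLo (PySem.List.sorted b (fun x => x) false) x 0 (PySem.List.sorted b (fun x => x) false).length) 0 ≠ x := by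
        intro hx
        apply hm
        rw [← PySem.List.mem_sorted (xs := b) (key := fun x => x) (rev := false), ← hx,
          List.getD_eq_getElem _ _ hrlen]
        exact List.getElem_mem hrlen
      rw [Bool.and_eq_false_iff]
      right
      rw [beq_eq_false_iff_ne]
      exact hne
    · rw [Bool.and_eq_false_iff]
      left
      rw [decide_eq_false_iff_not]
      exact hrlen

-- A's membership test agrees with B's binary search
theorem pv_cond_eq (b : List Int) (x : Int) :
    decide (x ∈ PySem.Set.ofList b) = pvPresent (PySem.List.sorted b (fun x => x) false) x := by
  rw [pvPresent_iff]
  simp [PySem.Set.mem_ofList]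

-- when k ≤ missing_count, A's loop never fires and returns -1
theorem loopA_neg (bset : PySem.Set Int) (k : Int) :
    ∀ xs c, k ≤ c → find_kth_loopA xs bset k c = -1 := by
  intro xs
  induction xs with
  | nil => intro c _; rfl
  | cons x rest ih =>
      intro c hc
      unfold find_kth_loopA
      by_cases hm : x ∈ bset
      · simp only [hm, decide_true, Bool.not_true, Bool.false_eq_true, if_false]
        exact ih c hc
      · simp only [hm, decide_false, Bool.not_false, if_true]
        have : (c + 1 == k) = false := by simp; omega
        rw [this]
        simp only [Bool.false_eq_true, if_false]
        exact ih (c + 1) (by omega)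

-- the up-counter loop equals the countdown loop
theorem loopA_eq_loopB (b : List Int) (k : Int) :
    ∀ xs c, c < k →
    find_kth_loopA xs (PySem.Set.ofList b) k c =
      find_kth_loopB (PySem.List.sorted b (fun x => x) false) xs (k - c) := by
  intro xs
  induction xs with
  | nil => intro c _; rfl
  | cons x rest ih =>
      intro c hc
      unfold find_kth_loopA find_kth_loopB
      rw [pv_cond_eq b x]
      by_cases hm : pvPresent (PySem.List.sorted b (fun x => x) false) x
      · simp only [hm, Bool.not_true, Bool.false_eq_true, if_false, if_true]
        exact ih c hc
      · simp only [Bool.not_eq_true] at hm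
        simp only [hm, Bool.not_false, Bool.false_eq_true, if_true, if_false]
        by_cases hk : c + 1 = k
        · have h1 : (c + 1 == k) = true := by simp [hk]
          have h2 : (k - c - 1 == 0) = true := by simp; omega
          rw [h1, h2]
          simp
        · have h1 : (c + 1 == k) = false := by simp [hk]
          have h2 : (k - c - 1 == 0) = false := by simp; omega
          rw [h1, h2]
          simp only [Bool.false_eq_true, if_false]
          have := ih (c + 1) (by omega)
          rw [this]
          congr 1
          omega

-- ===== VERDICT (by name: the statement is the Claim_ definition above) =====
theorem find_kth_missing_element_spec : Claim_equal_find_kth_missing_element := by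
  intro a b k _
  unfold Spec_find_kth_missing_element find_kth_missing_element find_kth_missing_element_alt
  by_cases hk : 1 ≤ k
  · rw [if_pos hk, loopA_eq_loopB b k a 0 (by omega)]
    norm_num
  · rw [if_neg hk, loopA_neg _ _ _ _ (by omega)]
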